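-- pv_equiv track=rewrite | github.com/WebAssembly/wasp | src/text/gen-keywords.py | DistinctChars
-- ===== SOURCE A (Python) =====
-- import collections
--
-- def DistinctChars(keys, index):
--     distinct = collections.defaultdict(list)
--     for key in keys:
--         assert(index <= len(key))
--         if index < len(key):
--             distinct[key[index]].append(key)
--         else:
--             distinct['\0'].append(key)
--     return len(distinct), index, distinct
-- ===== SOURCE B (Python) =====
-- # B: two-phase grouping — map each key to its group char, dedup chars in first-occurrence
-- # order, then build each group by filtering; replaces A's single-pass defaultdict accumulation.
-- def DistinctChars(keys, index):
--     def group_char(key):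
--         assert(index <= len(key))
--         return key[index] if index < len(key) else '\0'
--     chars = [group_char(key) for key in keys]
--     order = []
--     for c in chars:
--         if c not in order:
--             order.append(c)
--     distinct = {c: [k for k, d in zip(keys, chars) if d == c] for c in order}
--     return len(distinct), index, distinct
-- ===== Notes on version B (the rewrite author's own statement) =====
-- stated objective: alternative
-- what changed: A builds the groups in one pass with a defaultdict append per key; B first maps every key to its grouping character, deduplicates those characters in first-occurrence order, and then builds each group by filtering the key list per distinct character.
import Mathlib
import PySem

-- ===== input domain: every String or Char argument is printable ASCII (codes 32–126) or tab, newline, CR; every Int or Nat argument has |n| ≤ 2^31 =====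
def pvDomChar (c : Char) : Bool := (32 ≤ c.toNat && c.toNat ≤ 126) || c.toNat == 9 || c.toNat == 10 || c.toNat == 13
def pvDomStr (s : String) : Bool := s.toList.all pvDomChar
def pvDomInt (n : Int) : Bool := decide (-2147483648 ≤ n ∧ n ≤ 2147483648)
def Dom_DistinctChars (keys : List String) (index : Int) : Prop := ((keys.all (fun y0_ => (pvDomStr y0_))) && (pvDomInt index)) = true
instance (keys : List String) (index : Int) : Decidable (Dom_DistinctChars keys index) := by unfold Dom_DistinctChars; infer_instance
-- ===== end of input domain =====

-- B replaces A's one-pass defaultdict grouping by a two-phase dedup-then-filter construction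
-- (alternative decomposition, same results; not claimed faster).


-- ===== PORT A =====
def DistinctChars (keys : List String) (index : Int) : Int × Int × (List (String × List String)) :=
  let d : PySem.Dict String (List String) :=
    keys.foldl (fun d key =>
      -- assert(index <= len(key)): when index > len(key) Python raises AssertionError (excluded by Pre_)
      if index < PySem.Str.len key then
        match PySem.Str.pyGet? key index with
        | some c => d.modify (String.mk [c]) [] (fun v => v ++ [key])  -- distinct[key[index]].append(key)
        | none => d  -- IndexError (index < -len(key)); excluded by Pre_
      else
        d.modify "\x00" [] (fun v => v ++ [key])  -- distinct['\0'].append(key)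
      ) PySem.Dict.empty
  ((d.size : Int), index, d.items)

-- ===== PORT B =====
-- group_char(key): key[index] if index < len(key) else '\0' (where Python B raises
-- AssertionError/IndexError the result is unused — those inputs are excluded by Pre_)
def pvGroupChar (index : Int) (key : String) : String :=
  if index < PySem.Str.len key then
    match PySem.Str.pyGet? key index with
    | some c => String.mk [c]
    | none => "\x00"
  else "\x00"

def DistinctChars_alt (keys : List String) (index : Int) : Int × Int × (List (String × List String)) :=
  let chars := keys.map (pvGroupChar index)
  let order := chars.foldl (fun ord c => if ord.contains c then ord else ord ++ [c]) ([] : List String)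
  let distinct := order.map (fun c => (c, ((keys.zip chars).filter (fun p => p.2 == c)).map (fun p => p.1)))
  ((distinct.length : Int), index, distinct)

-- ===== PRECONDITION & SPEC =====
-- A raises AssertionError when index > len(key) for some key, and IndexError when
-- index < -len(key); Pre_ excludes exactly those inputs.
def Pre_DistinctChars (keys : List String) (index : Int) : Prop :=
  ∀ key ∈ keys, -(PySem.Str.len key) ≤ index ∧ index ≤ PySem.Str.len key
instance (keys : List String) (index : Int) : Decidable (Pre_DistinctChars keys index) := by unfold Pre_DistinctChars; infer_instance

def pvWitness_DistinctChars : List String × Int := (["ab", "cb", "a"], 1)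

def Spec_DistinctChars (keys : List String) (index : Int) (out : Int × Int × (List (String × List String))) : Prop := out = DistinctChars_alt keys index
instance (keys : List String) (index : Int) (out : Int × Int × (List (String × List String))) : Decidable (Spec_DistinctChars keys index out) := by unfold Spec_DistinctChars; infer_instance

-- ===== CLAIM (what is proved, stated in full; the proofs are below) =====
def Claim_equal_DistinctChars : Prop := ∀ (keys : List String) (index : Int), Dom_DistinctChars keys index → Pre_DistinctChars keys index → Spec_DistinctChars keys index (DistinctChars keys index)

-- ===== LEMMAS AND PROOFS =====

-- in range on the left: the indexed character exists
theorem pvListPyGet_isSome (l : List Char) (i : Int) (h1 : -(l.length : Int) ≤ i)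
    (h2 : i < (l.length : Int)) : ∃ c, PySem.List.pyGet? l i = some c := by
  rw [← Option.isSome_iff_exists]
  simp only [PySem.List.pyGet?, PySem.List.pyIdx?]
  split_ifs <;> simp_all <;> omega

-- inside Pre_, A's loop body groups under exactly pvGroupChar index key
theorem pvBodyEq (keys : List String) (index : Int) (hp : Pre_DistinctChars keys index)
    (d : PySem.Dict String (List String)) (key : String) (hk : key ∈ keys) :
    (if index < PySem.Str.len key then
        match PySem.Str.pyGet? key index with
        | some c => d.modify (String.mk [c]) [] (fun v => v ++ [key])
        | none => d
      else d.modify "\x00" [] (fun v => v ++ [key]))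
      = d.modify (pvGroupChar index key) [] (fun v => v ++ [key]) := by
  obtain ⟨h1, _⟩ := hp key hk
  unfold pvGroupChar
  simp only [PySem.Str.len, String.length_toList, PySem.Str.pyGet?,
    PySem.Chars.pyGet?_eq_listPyGet?] at *
  by_cases h : index < (key.length : Int)
  · obtain ⟨c, hc⟩ := pvListPyGet_isSome key.toList index (by simpa using h1) (by simpa using h)
    simp [h, hc]
  · simp [h]

-- B's per-group filter over the zipped list is a plain filter of keys
theorem pvGroupEq (keys : List String) (index : Int) (c : String) :
    ((keys.zip (keys.map (pvGroupChar index))).filter (fun p => p.2 == c)).map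
        (fun p => p.1)
      = keys.filter (fun k => pvGroupChar index k == c) := by
  have hz : keys.zip (keys.map (pvGroupChar index))
      = keys.map (fun k => (k, pvGroupChar index k)) := by
    calc keys.zip (keys.map (pvGroupChar index))
        = (keys.map id).zip (keys.map (pvGroupChar index)) := by rw [List.map_id]
      _ = keys.map (fun k => (k, pvGroupChar index k)) := List.zip_map'
  rw [hz, List.filter_map, List.map_map]
  simp [Function.comp_def]

-- ===== VERDICT (by name: the statement is the Claim_ definition above) =====
theorem DistinctChars_spec : Claim_equal_DistinctChars := by
  intro keys index _ hp
  unfold Spec_DistinctChars DistinctChars DistinctChars_alt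
  -- common names
  set c := pvGroupChar index with hcdef
  have hA : keys.foldl (fun d key =>
      if index < PySem.Str.len key then
        match PySem.Str.pyGet? key index with
        | some ch => d.modify (String.mk [ch]) [] (fun v => v ++ [key])
        | none => d
      else d.modify "\x00" [] (fun v => v ++ [key])) PySem.Dict.empty
      = keys.foldl (fun d key => d.modify (c key) [] (fun v => v ++ [key])) PySem.Dict.empty :=
    PySem.List.foldl_congr_mem _ _ _ _ (fun d key hk => pvBodyEq keys index hp d key hk)
  simp only [hA]
  -- A's dict: keys / nodup / items
  have hkeys : (keys.foldl (fun d key => d.modify (c key) [] (fun v => v ++ [key]))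
      PySem.Dict.empty).keys = PySem.Set.ofList (keys.map c) := by
    rw [PySem.Dict.keys_foldl_modify_key keys c [] (fun _ key => fun v => v ++ [key])]
    simp [pysem, PySem.Set.update, PySem.Set.ofList_eq_foldl]
  have hnd : (keys.foldl (fun d key => d.modify (c key) [] (fun v => v ++ [key]))
      PySem.Dict.empty).keys.Nodup := by
    rw [hkeys]; exact PySem.Set.nodup_ofList _
  have hitems : (keys.foldl (fun d key => d.modify (c key) [] (fun v => v ++ [key]))
      PySem.Dict.empty).items
      = (PySem.Set.ofList (keys.map c)).map
          (fun ch => (ch, keys.filter (fun k => c k == ch))) := by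
    rw [PySem.Dict.items_eq_map_keys _ hnd [], hkeys]
    apply List.map_congr_left
    intro ch _
    have hfold : keys.foldl (fun d key => d.modify (c key) [] (fun v => v ++ [key]))
        PySem.Dict.empty
        = (keys.map (fun k => (c k, k))).foldl
            (fun d p => d.modify p.1 [] (fun v => v ++ [p.2])) PySem.Dict.empty := by
      rw [List.foldl_map]
    rw [hfold, PySem.Dict.getD_foldl_modify_append, PySem.Dict.getD_empty, List.nil_append,
      List.filter_map, List.map_map]
    simp [Function.comp_def]
  -- B's order list is Set.ofList of the char list
  have horder : (keys.map c).foldl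
      (fun ord ch => if ord.contains ch then ord else ord ++ [ch]) ([] : List String)
      = PySem.Set.ofList (keys.map c) := by
    rw [PySem.Set.ofList_eq_foldl]; rfl
  have hg : ∀ ch, ((keys.zip (keys.map c)).filter (fun p => p.2 == ch)).map (fun p => p.1)
      = keys.filter (fun k => c k == ch) := fun ch => pvGroupEq keys index ch
  simp only [horder, hitems, PySem.Dict.size, hg]
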